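-- pv_equiv track=rewrite | github.com/thu-hoai/Intek-project | tien-len-game/tienlentrick.py | __build_variable_length_sequence_ranks
-- ===== SOURCE A (Python) =====
-- def __build_variable_length_sequence_ranks(dic):
--     """ Return list of all the possible combinations of lists of values of dictionary
--         bases on consecutive keys of given dictionary
--
--     Args: dic (dict): a dictionary
--
--     Return: all the possible combinations of lists of values of given dictionary
--     """
--     # initialize with the first value in the dict
--     keys_list = [[list(dic.keys())[0]]]
--     values_lists = [list(dic.values())[0]]
--     for i, val in enumerate(list(dic.keys())[1:]):
--         if val - keys_list[-1][-1] > 1: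
--             # create a new group
--             keys_list.append([val])
--             values_lists.extend([dic[val]])
--         else:
--             # append to the most recent group
--             keys_list[-1].append(val)
--             values_lists[-1].extend(dic[val])
--
--     return values_lists
-- ===== SOURCE B (Python) =====
-- def __build_variable_length_sequence_ranks(dic):
--     """Back-to-front: walk the items right-to-left, zipped with each item's
--     right neighbour, collecting each run's value lists as chunks; then
--     flatten each run.  Builds new lists (does not mutate dic's value lists,
--     unlike the original); the return value is identical."""
--     items = list(dic.items())
--     runs = [[items[-1][1]]]          # value chunks of each run, collected right-to-left
--     for (k, v), (nk, _) in zip(reversed(items[:-1]), reversed(items[1:])):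
--         if nk - k > 1:
--             runs.append([v])
--         else:
--             runs[-1].append(v)
--     return [[x for v in reversed(run) for x in v] for run in reversed(runs)]
-- ===== Notes on version B (the rewrite author's own statement) =====
-- stated objective: alternative
-- what changed: A builds the answer front-to-back in one loop over a dual accumulator (keys_list, values_lists), extending the dict's value lists in place; B walks the items back-to-front zipped with each item's right neighbour, collecting each run's value lists as chunks and flattening each run at the end, mutating nothing.
-- outside the precondition, e.g. on __build_variable_length_sequence_ranks({}): A raises IndexError, B raises IndexError
import Mathlib
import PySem

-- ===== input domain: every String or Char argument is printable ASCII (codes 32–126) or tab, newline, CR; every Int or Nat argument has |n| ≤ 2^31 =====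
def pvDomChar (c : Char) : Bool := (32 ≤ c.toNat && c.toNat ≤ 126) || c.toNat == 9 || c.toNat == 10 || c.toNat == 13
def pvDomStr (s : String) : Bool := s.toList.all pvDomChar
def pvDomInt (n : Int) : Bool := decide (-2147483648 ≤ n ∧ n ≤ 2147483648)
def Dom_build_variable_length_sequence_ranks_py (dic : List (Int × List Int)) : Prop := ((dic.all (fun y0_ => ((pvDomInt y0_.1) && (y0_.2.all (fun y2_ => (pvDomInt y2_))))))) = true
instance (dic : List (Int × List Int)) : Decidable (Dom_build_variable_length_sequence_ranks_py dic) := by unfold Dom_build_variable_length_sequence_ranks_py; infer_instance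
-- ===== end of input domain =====

-- B replaces A's front-to-back loop over a dual accumulator (keys_list, values_lists)
-- by a back-to-front pass: the items are walked right-to-left zipped with each item's
-- right neighbour, collecting each run's value lists as chunks, then each run is
-- flattened (objective: alternative). Equivalence is about the RETURN value: A extends
-- the dict's value lists in place, B builds new lists and does not mutate its argument.

-- ===== PORT A =====
-- keys_list[-1][-1] (last key of the last group; 0 is unreachable under Pre_)
def pvLastLast (xss : List (List Int)) : Int :=
  ((xss.getLast?.getD []).getLast?.getD 0)

-- xss[-1].append(x)
def pvAppendLast {α : Type} (xss : List (List α)) (x : α) : List (List α) :=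
  match xss with
  | [] => []
  | [ys] => [ys ++ [x]]
  | ys :: rest => ys :: pvAppendLast rest x

-- values_lists[-1].extend(vs)
def pvExtendLast (xss : List (List Int)) (vs : List Int) : List (List Int) :=
  match xss with
  | [] => []
  | [ys] => [ys ++ vs]
  | ys :: rest => ys :: pvExtendLast rest vs

def build_variable_length_sequence_ranks_py (dic : List (Int × List Int)) : List (List Int) :=
  let d := PySem.Dict.ofList dic
  match d.keys with
  | [] => []   -- Python raises IndexError here; excluded by Pre_
  | k0 :: rest =>
    let st := rest.foldl
      (fun (st : List (List Int) × List (List Int)) val =>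
        if val - pvLastLast st.1 > 1 then
          (st.1 ++ [[val]], st.2 ++ [d.getD val []])
        else
          (pvAppendLast st.1 val, pvExtendLast st.2 (d.getD val [])))
      ([[k0]], [d.getD k0 []])
    st.2

-- ===== PORT B =====
def build_variable_length_sequence_ranks_py_alt (dic : List (Int × List Int)) : List (List Int) :=
  let items := (PySem.Dict.ofList dic).items
  match items.getLast? with
  | none => []   -- Python raises IndexError here (items[-1] on empty); excluded by Pre_
  | some lastp =>
    -- zip(reversed(items[:-1]), reversed(items[1:])): each item with its right neighbour
    let runs := ((items.dropLast.reverse).zip ((items.drop 1).reverse)).foldl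
      (fun runs pp =>
        if pp.2.1 - pp.1.1 > 1 then runs ++ [[pp.1.2]] else pvAppendLast runs pp.1.2)
      [[lastp.2]]
    -- [[x for v in reversed(run) for x in v] for run in reversed(runs)]
    (runs.reverse).map (fun run => run.reverse.flatMap id)

-- ===== PRECONDITION & SPEC =====
-- A evaluates list(dic.keys())[0]: the empty dict raises IndexError, so it is excluded.
def Pre_build_variable_length_sequence_ranks_py (dic : List (Int × List Int)) : Prop := dic ≠ []
instance (dic : List (Int × List Int)) : Decidable (Pre_build_variable_length_sequence_ranks_py dic) := by unfold Pre_build_variable_length_sequence_ranks_py; infer_instance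
def pvWitness_build_variable_length_sequence_ranks_py : (List (Int × List Int)) := [(3, [10, 11]), (4, [12]), (7, [13])]

def Spec_build_variable_length_sequence_ranks_py (dic : List (Int × List Int)) (out : List (List Int)) : Prop := out = build_variable_length_sequence_ranks_py_alt dic
instance (dic : List (Int × List Int)) (out : List (List Int)) : Decidable (Spec_build_variable_length_sequence_ranks_py dic out) := by unfold Spec_build_variable_length_sequence_ranks_py; infer_instance

-- ===== CLAIM (what is proved, stated in full; the proofs are below) =====
def Claim_equal_build_variable_length_sequence_ranks_py : Prop := ∀ (dic : List (Int × List Int)), Dom_build_variable_length_sequence_ranks_py dic → Pre_build_variable_length_sequence_ranks_py dic → Spec_build_variable_length_sequence_ranks_py dic (build_variable_length_sequence_ranks_py dic)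

-- ===== LEMMAS AND PROOFS =====

-- proof-only middle layer: B's run decomposition as a front-to-back recursion
def pvRuns : List (Int × List Int) → List (List Int)
  | [] => []
  | [(_, v)] => [v]
  | (k, v) :: (k', v') :: rest =>
    let r := pvRuns ((k', v') :: rest)
    if k' - k > 1 then v :: r
    else (v ++ r.headD []) :: r.tail

-- proof-only abstraction of A's grouping: the key runs, as A's fold builds them
def pvGroupKeys (ks : List Int) : List (List Int) :=
  match ks with
  | [] => []
  | k0 :: rest =>
    rest.foldl
      (fun gs k => if k - pvLastLast gs > 1 then gs ++ [[k]] else pvAppendLast gs k)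
      [[k0]]

-- the concatenated values of one key run
def pvConcatGroup (d : PySem.Dict Int (List Int)) (g : List Int) : List Int :=
  match g with
  | [] => []
  | k0 :: rest => rest.foldl (fun acc k => acc ++ d.getD k []) (d.getD k0 [])

-- A's grouping, rephrased: merge keys ks into the open run g
def pvConsume : List Int → List Int → List (List Int)
  | g, [] => [g]
  | g, k :: ks =>
    if k - (g.getLast?.getD 0) > 1 then g :: pvConsume [k] ks else pvConsume (g ++ [k]) ks

-- B's grouping, on keys alone: back-to-front run decomposition
def pvGoK : List Int → List (List Int)
  | [] => []
  | [k] => [[k]]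
  | k :: k' :: ks =>
    let r := pvGoK (k' :: ks)
    if k' - k > 1 then [k] :: r else (k :: r.headD []) :: r.tail

-- each item paired with its right neighbour
def pvAdj (items : List (Int × List Int)) : List ((Int × List Int) × (Int × List Int)) :=
  items.dropLast.zip (items.drop 1)

lemma pvAdj_cons (p p' : Int × List Int) (rest : List (Int × List Int)) :
    pvAdj (p :: p' :: rest) = (p, p') :: pvAdj (p' :: rest) := by
  simp [pvAdj]

lemma pvGoK_cons_shape (x : Int) (ks : List Int) :
    ∃ s t, pvGoK (x :: ks) = (x :: s) :: t := by
  cases ks with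
  | nil => exact ⟨[], [], rfl⟩
  | cons k' ks' =>
    simp only [pvGoK]
    split_ifs with h
    · exact ⟨[], _, rfl⟩
    · exact ⟨_, _, rfl⟩

lemma pvLastLast_concat (pre : List (List Int)) (g : List Int) :
    pvLastLast (pre ++ [g]) = g.getLast?.getD 0 := by
  simp [pvLastLast]

lemma pvAppendLast_concat {α : Type} (pre : List (List α)) (g : List α) (k : α) :
    pvAppendLast (pre ++ [g]) k = pre ++ [g ++ [k]] := by
  induction pre with
  | nil => rfl
  | cons p pre ih =>
    cases pre with
    | nil => rfl
    | cons q pre' => simpa [pvAppendLast] using ih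

lemma pvAppendLast_ne_nil {α : Type} (xss : List (List α)) (x : α) (h : xss ≠ []) :
    pvAppendLast xss x ≠ [] := by
  cases xss with
  | nil => exact absurd rfl h
  | cons ys rest => cases rest <;> simp [pvAppendLast]

-- A's fold over an accumulator ending in the open run g is pvConsume
lemma foldG_eq_consume (ks : List Int) : ∀ (pre : List (List Int)) (g : List Int),
    ks.foldl
      (fun gs k => if k - pvLastLast gs > 1 then gs ++ [[k]] else pvAppendLast gs k)
      (pre ++ [g])
    = pre ++ pvConsume g ks := by
  induction ks with
  | nil => intro pre g; rfl
  | cons k ks ih =>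
    intro pre g
    simp only [List.foldl_cons, pvLastLast_concat, pvConsume]
    by_cases h : k - g.getLast?.getD 0 > 1
    · simp only [if_pos h]
      rw [show pre ++ [g] ++ [[k]] = (pre ++ [g]) ++ [[k]] from rfl, ih (pre ++ [g]) [k]]
      simp
    · simp only [if_neg h, pvAppendLast_concat]
      exact ih pre (g ++ [k])

-- pvConsume with open run g ++ [x] is pvGoK of x :: ks, with g glued onto the first run
lemma pvConsume_eq_goK (ks : List Int) : ∀ (g : List Int) (x : Int),
    pvConsume (g ++ [x]) ks
      = (g ++ (pvGoK (x :: ks)).headD []) :: (pvGoK (x :: ks)).tail := by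
  induction ks with
  | nil => intro g x; simp [pvConsume, pvGoK]
  | cons k ks ih =>
    intro g x
    obtain ⟨s, t, hst⟩ := pvGoK_cons_shape k ks
    simp only [pvConsume, List.getLast?_concat, Option.getD_some, pvGoK, hst]
    by_cases h : k - x > 1
    · simp only [if_pos h]
      have := ih [] k
      simp only [List.nil_append, hst] at this
      simp [this]
    · simp only [if_neg h]
      have := ih (g ++ [x]) k
      simp only [hst] at this
      rw [show g ++ [x] ++ [k] = (g ++ [x]) ++ [k] from rfl, this]
      simp

lemma pvGroupKeys_eq_goK (ks : List Int) : pvGroupKeys ks = pvGoK ks := by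
  cases ks with
  | nil => rfl
  | cons k0 rest =>
    obtain ⟨s, t, hst⟩ := pvGoK_cons_shape k0 rest
    have h1 : pvGroupKeys (k0 :: rest) = [] ++ pvConsume [k0] rest := by
      simpa [pvGroupKeys] using foldG_eq_consume rest [] [k0]
    rw [h1, show ([k0] : List Int) = [] ++ [k0] from rfl, pvConsume_eq_goK rest [] k0, hst]
    simp

-- accumulator of a value-concatenating fold splits off its prefix
lemma foldl_append_shift (g : Int → List Int) : ∀ (l : List Int) (x y : List Int),
    l.foldl (fun a k => a ++ g k) (x ++ y) = x ++ l.foldl (fun a k => a ++ g k) y := by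
  intro l
  induction l with
  | nil => intro x y; rfl
  | cons k l ih =>
    intro x y
    simp only [List.foldl_cons, List.append_assoc]
    exact ih x (y ++ g k)

-- prepending a key to a nonempty run prepends its values
lemma pvConcatGroup_cons (d : PySem.Dict Int (List Int)) (k : Int) (h0 : Int) (h' : List Int) :
    pvConcatGroup d (k :: h0 :: h') = d.getD k [] ++ pvConcatGroup d (h0 :: h') := by
  simp only [pvConcatGroup, List.foldl_cons]
  exact foldl_append_shift (fun j => d.getD j []) h' (d.getD k []) (d.getD h0 [])

-- pvRuns is pvGoK on the keys, mapped through value concatenation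
lemma pvRuns_eq_goK (d : PySem.Dict Int (List Int)) :
    ∀ (l : List (Int × List Int)), (∀ p ∈ l, d.getD p.1 [] = p.2) →
      pvRuns l = (pvGoK (l.map Prod.fst)).map (pvConcatGroup d) := by
  intro l
  induction l using pvRuns.induct with
  | case1 => intro _; rfl
  | case2 k v =>
    intro h
    have hv := h (k, v) (by simp)
    simp [pvRuns, pvGoK, pvConcatGroup, hv]
  | case3 k v k' v' rest hc ih =>
    intro h
    have hv : d.getD k [] = v := h (k, v) (by simp)
    have hrec := ih (fun p hp => h p (List.mem_cons_of_mem _ hp))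
    obtain ⟨s, t, hst⟩ := pvGoK_cons_shape k' (rest.map Prod.fst)
    simp only [pvRuns, List.map_cons, pvGoK, hst] at *
    simp only [if_pos hc, hrec]
    simp [pvConcatGroup, hv]
  | case4 k v k' v' rest hc ih =>
    intro h
    have hv : d.getD k [] = v := h (k, v) (by simp)
    have hrec := ih (fun p hp => h p (List.mem_cons_of_mem _ hp))
    obtain ⟨s, t, hst⟩ := pvGoK_cons_shape k' (rest.map Prod.fst)
    simp only [pvRuns, List.map_cons, pvGoK, hst] at *
    simp only [if_neg hc, hrec]
    simp only [List.map_cons, List.headD_cons, List.tail_cons]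
    rw [pvConcatGroup_cons d k k' s, hv]

-- dic[g ++ [v]] concatenates dic[g] with dic[v] (also when g = [])
lemma pvConcatGroup_append (d : PySem.Dict Int (List Int)) (g : List Int) (v : Int) :
    pvConcatGroup d (g ++ [v]) = pvConcatGroup d g ++ d.getD v [] := by
  cases g with
  | nil => simp [pvConcatGroup]
  | cons k0 rest => simp [pvConcatGroup, List.foldl_append]

lemma map_pvAppendLast (d : PySem.Dict Int (List Int)) (gs : List (List Int)) (v : Int) :
    (pvAppendLast gs v).map (pvConcatGroup d)
      = pvExtendLast (gs.map (pvConcatGroup d)) (d.getD v []) := by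
  induction gs with
  | nil => rfl
  | cons g rest ih =>
    cases rest with
    | nil => simp [pvAppendLast, pvExtendLast, pvConcatGroup_append]
    | cons g' rest' =>
      simp only [pvAppendLast, pvExtendLast, List.map_cons] at *
      exact congrArg _ ih

-- A's fold carries (groups, groups mapped through concatenation)
lemma foldA_eq (d : PySem.Dict Int (List Int)) (rest : List Int) (gs : List (List Int)) :
    rest.foldl
      (fun (st : List (List Int) × List (List Int)) val =>
        if val - pvLastLast st.1 > 1 then
          (st.1 ++ [[val]], st.2 ++ [d.getD val []])
        else
          (pvAppendLast st.1 val, pvExtendLast st.2 (d.getD val [])))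
      (gs, gs.map (pvConcatGroup d))
    = (let gs' := rest.foldl
        (fun gs k => if k - pvLastLast gs > 1 then gs ++ [[k]] else pvAppendLast gs k) gs;
       (gs', gs'.map (pvConcatGroup d))) := by
  induction rest generalizing gs with
  | nil => rfl
  | cons v rest ih =>
    simp only [List.foldl_cons]
    by_cases h : v - pvLastLast gs > 1
    · simp only [if_pos h]
      have : (gs ++ [[v]]).map (pvConcatGroup d)
          = gs.map (pvConcatGroup d) ++ [d.getD v []] := by
        simp [pvConcatGroup]
      rw [← this]
      exact ih (gs ++ [[v]])
    · simp only [if_neg h]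
      rw [← map_pvAppendLast]
      exact ih (pvAppendLast gs v)

-- zip of two reversed equal-length lists is the reversed zip
lemma zip_reverse_eq {α β : Type} (l : List α) (m : List β) (h : l.length = m.length) :
    l.reverse.zip m.reverse = (l.zip m).reverse := by
  induction l generalizing m with
  | nil => simp
  | cons a l ih =>
    cases m with
    | nil => simp at h
    | cons b m =>
      simp only [List.length_cons, Nat.succ_inj] at h
      rw [List.reverse_cons, List.reverse_cons, List.zip_append (by simp [h]), ih m h]
      simp

-- B's foldr over the adjacent pairs never empties the run list
lemma foldrRuns_ne_nil (L : List ((Int × List Int) × (Int × List Int))) (v0 : List Int) :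
    L.foldr
      (fun pp acc =>
        if pp.2.1 - pp.1.1 > 1 then acc ++ [[pp.1.2]] else pvAppendLast acc pp.1.2)
      [[v0]] ≠ [] := by
  induction L with
  | nil => simp
  | cons pp L ih =>
    simp only [List.foldr_cons]
    split_ifs
    · simp
    · exact pvAppendLast_ne_nil _ _ ih

-- B's backwards fold, reversed and flattened, is pvRuns
lemma foldrRuns_eq_pvRuns :
    ∀ (items : List (Int × List Int)) (h : items ≠ []),
      (((pvAdj items).foldr
          (fun pp acc =>
            if pp.2.1 - pp.1.1 > 1 then acc ++ [[pp.1.2]] else pvAppendLast acc pp.1.2)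
          [[(items.getLast h).2]]).reverse).map (fun run => run.reverse.flatMap id)
      = pvRuns items := by
  intro items
  induction items using pvRuns.induct with
  | case1 => intro h; exact absurd rfl h
  | case2 k v => intro h; simp [pvAdj, pvRuns]
  | case3 k v k' v' rest hc ih =>
    intro h
    have h' : (k', v') :: rest ≠ [] := by simp
    have hlast : ((k, v) :: (k', v') :: rest).getLast h = ((k', v') :: rest).getLast h' :=
      List.getLast_cons h'
    rw [hlast, pvAdj_cons, List.foldr_cons]
    simp only [if_pos hc]
    rw [List.reverse_append, List.map_append]
    simp only [List.reverse_singleton, List.map_cons, List.map_nil]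
    rw [List.singleton_append, ih h']
    simp [pvRuns, if_pos hc]
  | case4 k v k' v' rest hc ih =>
    intro h
    have h' : (k', v') :: rest ≠ [] := by simp
    have hlast : ((k, v) :: (k', v') :: rest).getLast h = ((k', v') :: rest).getLast h' :=
      List.getLast_cons h'
    rw [hlast, pvAdj_cons, List.foldr_cons]
    simp only [if_neg hc]
    have hne := foldrRuns_ne_nil (pvAdj ((k', v') :: rest)) ((((k', v') :: rest)).getLast h').2
    obtain ⟨Q, g, hQ⟩ := (List.eq_nil_or_concat _).resolve_left hne
    have hih := ih h'
    rw [hQ] at hih ⊢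
    simp only [List.concat_eq_append] at hih ⊢
    rw [pvAppendLast_concat]
    simp only [List.reverse_append, List.reverse_singleton, List.singleton_append,
      List.map_cons] at hih ⊢
    simp only [pvRuns, if_neg hc, ← hih]
    simp

-- ===== VERDICT (by name: the statement is the Claim_ definition above) =====
theorem build_variable_length_sequence_ranks_py_spec : Claim_equal_build_variable_length_sequence_ranks_py := by
  intro dic _ _
  unfold Spec_build_variable_length_sequence_ranks_py
  unfold build_variable_length_sequence_ranks_py build_variable_length_sequence_ranks_py_alt
  have hnd : (PySem.Dict.ofList dic).keys.Nodup := PySem.Dict.nodup_keys_ofList dic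
  have hkeys : (PySem.Dict.ofList dic).keys = (PySem.Dict.ofList dic).items.map Prod.fst := rfl
  cases hitems : (PySem.Dict.ofList dic).items with
  | nil => simp only [hkeys, hitems]; rfl
  | cons i0 irest =>
    have hne : i0 :: irest ≠ [] := by simp
    -- B side: turn the foldl over the reversed zip into the foldr over pvAdj
    have hlen : ((i0 :: irest).dropLast).length = ((i0 :: irest).drop 1).length := by
      simp [List.length_dropLast]
    have hget : (i0 :: irest).getLast? = some ((i0 :: irest).getLast hne) :=
      List.getLast?_eq_some_getLast hne
    simp only [hkeys, hitems, hget]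
    rw [zip_reverse_eq _ _ hlen, List.foldl_reverse]
    have hB := foldrRuns_eq_pvRuns (i0 :: irest) hne
    simp only [pvAdj] at hB
    rw [hB]
    -- middle: pvRuns = pvGoK on the keys, mapped through concatenation
    have hmid := pvRuns_eq_goK (PySem.Dict.ofList dic) (i0 :: irest)
      (fun p hp => by
        obtain ⟨pk, pv⟩ := p
        exact PySem.Dict.getD_of_mem_items _ (hitems ▸ hp) hnd [])
    rw [hmid, ← pvGroupKeys_eq_goK]
    -- A side: the fold carries (groups, mapped groups)
    simp only [List.map_cons, pvGroupKeys]
    have init : ([[i0.1]] : List (List Int)).map (pvConcatGroup (PySem.Dict.ofList dic))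
        = [ (PySem.Dict.ofList dic).getD i0.1 [] ] := by simp [pvConcatGroup]
    rw [← init, foldA_eq]
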